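-- pv_equiv track=rewrite | github.com/bibeshpyakurel/JobInsight | icons/generate_icons.py | point_in_round_rect
-- ===== SOURCE A (Python) =====
-- def point_in_round_rect(x, y, left, top, right, bottom, radius):
--     if left + radius <= x <= right - radius and top <= y <= bottom:
--         return True
--     if left <= x <= right and top + radius <= y <= bottom - radius:
--         return True
--     corners = [
--         (left + radius, top + radius),
--         (right - radius, top + radius),
--         (left + radius, bottom - radius),
--         (right - radius, bottom - radius),
--     ]
--     for cx, cy in corners:
--         if (x - cx) ** 2 + (y - cy) ** 2 <= radius ** 2:
--             return True
--     return False
-- ===== SOURCE B (Python) =====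
-- def point_in_round_rect(x, y, left, top, right, bottom, radius):
--     if left + radius <= x <= right - radius and top <= y <= bottom:
--         return True
--     if left <= x <= right and top + radius <= y <= bottom - radius:
--         return True
--     dx = min(abs(x - (left + radius)), abs(x - (right - radius)))
--     dy = min(abs(y - (top + radius)), abs(y - (bottom - radius)))
--     return dx * dx + dy * dy <= radius * radius
-- ===== Notes on version B (the rewrite author's own statement) =====
-- stated objective: simpler
-- what changed: The explicit loop over the four corner centres is replaced by a nearest-corner distance test: coordinate-wise minima of the absolute offsets to the two corner abscissae/ordinates, then one squared-distance comparison.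
import Mathlib
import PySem

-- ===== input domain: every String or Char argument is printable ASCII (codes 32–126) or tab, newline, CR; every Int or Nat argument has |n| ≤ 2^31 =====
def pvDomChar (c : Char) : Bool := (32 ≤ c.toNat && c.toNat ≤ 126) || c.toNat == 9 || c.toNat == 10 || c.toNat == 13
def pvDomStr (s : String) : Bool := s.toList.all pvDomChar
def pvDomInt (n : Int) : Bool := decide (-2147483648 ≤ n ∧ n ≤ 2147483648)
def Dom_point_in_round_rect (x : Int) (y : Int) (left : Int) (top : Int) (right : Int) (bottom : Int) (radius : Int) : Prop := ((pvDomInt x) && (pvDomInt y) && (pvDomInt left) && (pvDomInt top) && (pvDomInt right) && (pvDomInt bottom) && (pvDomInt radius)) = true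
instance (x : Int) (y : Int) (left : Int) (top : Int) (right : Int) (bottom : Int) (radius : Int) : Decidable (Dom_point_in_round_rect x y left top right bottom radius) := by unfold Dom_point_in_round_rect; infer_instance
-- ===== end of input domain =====

-- B replaces A's explicit 4-corner loop by a nearest-corner test (coordinate-wise minima of
-- absolute offsets, one squared-distance comparison); objective: simpler.

-- ===== PORT A =====
def point_in_round_rect (x : Int) (y : Int) (left : Int) (top : Int) (right : Int) (bottom : Int) (radius : Int) : Bool :=
  if left + radius ≤ x ∧ x ≤ right - radius ∧ top ≤ y ∧ y ≤ bottom then true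
  else if left ≤ x ∧ x ≤ right ∧ top + radius ≤ y ∧ y ≤ bottom - radius then true
  else
    let corners : List (Int × Int) :=
      [(left + radius, top + radius), (right - radius, top + radius),
       (left + radius, bottom - radius), (right - radius, bottom - radius)]
    corners.any (fun c => decide ((x - c.1) ^ 2 + (y - c.2) ^ 2 ≤ radius ^ 2))

-- ===== PORT B =====
def point_in_round_rect_alt (x : Int) (y : Int) (left : Int) (top : Int) (right : Int) (bottom : Int) (radius : Int) : Bool :=
  if left + radius ≤ x ∧ x ≤ right - radius ∧ top ≤ y ∧ y ≤ bottom then true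
  else if left ≤ x ∧ x ≤ right ∧ top + radius ≤ y ∧ y ≤ bottom - radius then true
  else
    let dx := min |x - (left + radius)| |x - (right - radius)|
    let dy := min |y - (top + radius)| |y - (bottom - radius)|
    decide (dx * dx + dy * dy ≤ radius * radius)

-- ===== PRECONDITION & SPEC =====
def Spec_point_in_round_rect (x : Int) (y : Int) (left : Int) (top : Int) (right : Int) (bottom : Int) (radius : Int) (out : Bool) : Prop := out = point_in_round_rect_alt x y left top right bottom radius
instance (x : Int) (y : Int) (left : Int) (top : Int) (right : Int) (bottom : Int) (radius : Int) (out : Bool) : Decidable (Spec_point_in_round_rect x y left top right bottom radius out) := by unfold Spec_point_in_round_rect; infer_instance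

-- ===== CLAIM (what is proved, stated in full; the proofs are below) =====
def Claim_equal_point_in_round_rect : Prop := ∀ (x : Int) (y : Int) (left : Int) (top : Int) (right : Int) (bottom : Int) (radius : Int), Dom_point_in_round_rect x y left top right bottom radius → Spec_point_in_round_rect x y left top right bottom radius (point_in_round_rect x y left top right bottom radius)

-- ===== LEMMAS AND PROOFS =====

-- min |a| |b| squared is one of a^2, b^2 ...
theorem pv_min_sq_eq (a b : Int) :
    min |a| |b| * min |a| |b| = a ^ 2 ∨ min |a| |b| * min |a| |b| = b ^ 2 := by
  rcases min_choice |a| |b| with h | h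
  · left; rw [h, abs_mul_abs_self, sq]
  · right; rw [h, abs_mul_abs_self, sq]

-- ... and is below both of them.
theorem pv_min_sq_le (a b : Int) :
    min |a| |b| * min |a| |b| ≤ a ^ 2 ∧ min |a| |b| * min |a| |b| ≤ b ^ 2 := by
  have h0 : 0 ≤ min |a| |b| := le_min (abs_nonneg a) (abs_nonneg b)
  constructor
  · calc min |a| |b| * min |a| |b| ≤ |a| * |a| :=
          mul_self_le_mul_self h0 (min_le_left _ _)
      _ = a ^ 2 := by rw [abs_mul_abs_self, sq]
  · calc min |a| |b| * min |a| |b| ≤ |b| * |b| :=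
          mul_self_le_mul_self h0 (min_le_right _ _)
      _ = b ^ 2 := by rw [abs_mul_abs_self, sq]

-- The union of the four corner discs equals one disc test against the nearest corner,
-- because the minimum over the four corners separates coordinate-wise.
theorem pv_corner_min (a b c d r : Int) :
    (min |a| |b| * min |a| |b| + min |c| |d| * min |c| |d| ≤ r) ↔
    (a ^ 2 + c ^ 2 ≤ r ∨ b ^ 2 + c ^ 2 ≤ r ∨ a ^ 2 + d ^ 2 ≤ r ∨ b ^ 2 + d ^ 2 ≤ r) := by
  constructor
  · intro h
    rcases pv_min_sq_eq a b with h1 | h1 <;> rcases pv_min_sq_eq c d with h2 | h2 <;>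
      rw [h1, h2] at h <;> tauto
  · intro h
    obtain ⟨ha, hb⟩ := pv_min_sq_le a b
    obtain ⟨hc, hd⟩ := pv_min_sq_le c d
    rcases h with h | h | h | h <;> linarith

-- ===== VERDICT (by name: the statement is the Claim_ definition above) =====
theorem point_in_round_rect_spec : Claim_equal_point_in_round_rect := by
  intro x y left top right bottom radius _
  unfold Spec_point_in_round_rect point_in_round_rect point_in_round_rect_alt
  split_ifs with h1 h2
  · rfl
  · rfl
  · simp only [List.any_cons, List.any_nil, Bool.or_false]
    rw [Bool.eq_iff_iff]
    simp only [Bool.or_eq_true, decide_eq_true_eq]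
    rw [show radius * radius = radius ^ 2 by ring]
    exact Iff.symm ((pv_corner_min (x - (left + radius)) (x - (right - radius))
      (y - (top + radius)) (y - (bottom - radius)) (radius ^ 2)).trans (by tauto))
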